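-- pv_equiv track=rewrite | github.com/Jonathan-Jesni/pdf_converter | backend/app/converters/pdf_to_word/no_ocr.py | pair_form_rows
-- ===== SOURCE A (Python) =====
-- ROW_Y_THRESHOLD = 10
--
-- def pair_form_rows(left_lines, right_lines):
--     pairs = []
--     used = set()
--
--     for l_top, l_text in left_lines:
--         best = None
--         best_diff = None
--
--         for i, (r_top, r_text) in enumerate(right_lines):
--             if i in used:
--                 continue
--             diff = abs(l_top - r_top)
--             if diff <= ROW_Y_THRESHOLD and (best_diff is None or diff < best_diff):
--                 best = (i, r_text)
--                 best_diff = diff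
--
--         if best:
--             idx, r_text = best
--             used.add(idx)
--             pairs.append((l_text, r_text))
--         else:
--             pairs.append((l_text, ""))
--
--     return pairs
-- ===== SOURCE B (Python) =====
-- ROW_Y_THRESHOLD = 10
--
-- def pair_form_rows(left_lines, right_lines):
--     # Bucket right rows by their top coordinate; each bucket keeps original
--     # (ascending-index) order. For each left row, probe distances d = 0..threshold
--     # outward and take the earliest-indexed unused row at the nearest top.
--     buckets = {}
--     for i, (r_top, r_text) in enumerate(right_lines):
--         buckets.setdefault(r_top, []).append((i, r_text))
--
--     pairs = []
--     for l_top, l_text in left_lines: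
--         chosen_top = None
--         for d in range(ROW_Y_THRESHOLD + 1):
--             lo = buckets.get(l_top - d)
--             hi = buckets.get(l_top + d) if d else None
--             best_top = None
--             if lo:
--                 best_top = l_top - d
--             if hi and (best_top is None or hi[0][0] < lo[0][0]):
--                 best_top = l_top + d
--             if best_top is not None:
--                 chosen_top = best_top
--                 break
--         if chosen_top is None:
--             pairs.append((l_text, ""))
--         else:
--             _, r_text = buckets[chosen_top].pop(0)
--             pairs.append((l_text, r_text))
--     return pairs
-- ===== Notes on version B (the rewrite author's own statement) =====
-- stated objective: faster
-- what changed: Instead of rescanning all right rows for every left row (skipping a 'used' set), B groups right rows once into a dict keyed by top coordinate (each bucket in ascending original-index order) and answers each left row by probing the at most 21 tops within the threshold, popping the earliest-indexed row at the nearest top.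
import Mathlib
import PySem

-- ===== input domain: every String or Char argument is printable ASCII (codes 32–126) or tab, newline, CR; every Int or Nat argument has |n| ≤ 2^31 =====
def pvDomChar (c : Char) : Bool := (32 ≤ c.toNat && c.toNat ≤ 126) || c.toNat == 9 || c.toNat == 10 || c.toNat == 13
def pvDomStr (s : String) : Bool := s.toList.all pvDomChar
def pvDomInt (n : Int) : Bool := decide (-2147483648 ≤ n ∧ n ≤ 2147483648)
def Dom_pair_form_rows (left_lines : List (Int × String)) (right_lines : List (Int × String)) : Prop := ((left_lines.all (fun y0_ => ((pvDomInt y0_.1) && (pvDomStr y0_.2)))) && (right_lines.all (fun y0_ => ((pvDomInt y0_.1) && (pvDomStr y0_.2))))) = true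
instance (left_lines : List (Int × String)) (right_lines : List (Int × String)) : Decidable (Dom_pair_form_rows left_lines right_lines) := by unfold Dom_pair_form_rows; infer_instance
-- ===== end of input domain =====

-- B replaces A's per-left-row rescan of all right rows with a dict of rows bucketed by top,
-- probed at the ≤ 21 tops within the threshold: asymptotically faster (return values proved equal).

def ROW_Y_THRESHOLD : Int := 10

-- ===== PORT A =====
-- inner loop body of A: 'for i, (r_top, r_text) in enumerate(right_lines): …'
def pfrInnerStep (l_top : Int) (used : PySem.Set Int)
    (b : Option (Int × String) × Option Int) (p : Int × (Int × String)) :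
    Option (Int × String) × Option Int :=
  if PySem.Set.contains used p.1 then b
  else
    let diff := |l_top - p.2.1|
    let ok : Bool := decide (diff ≤ ROW_Y_THRESHOLD) &&
      (match b.2 with | none => true | some bd => decide (diff < bd))
    if ok then (some (p.1, p.2.2), some diff) else b

-- outer loop body of A
def pfrStepA (right_lines : List (Int × String))
    (st : List (String × String) × PySem.Set Int) (l : Int × String) :
    List (String × String) × PySem.Set Int :=
  let best := (PySem.List.enumerate right_lines 0).foldl (pfrInnerStep l.1 st.2) (none, none)
  match best.1 with
  | some q => (st.1 ++ [(l.2, q.2)], PySem.Set.add st.2 q.1)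
  | none => (st.1 ++ [(l.2, "")], st.2)

def pair_form_rows (left_lines : List (Int × String)) (right_lines : List (Int × String)) : List (String × String) :=
  (left_lines.foldl (pfrStepA right_lines)
    (([] : List (String × String)), (PySem.Set.empty : PySem.Set Int))).1

-- ===== PORT B =====
-- 'buckets.setdefault(r_top, []).append((i, r_text))' = Dict.modify r_top [] (· ++ [(i, r_text)])
def pfrBuckets (right_lines : List (Int × String)) : PySem.Dict Int (List (Int × String)) :=
  (PySem.List.enumerate right_lines 0).foldl
    (fun d p => d.modify p.2.1 [] (fun b => b ++ [(p.1, p.2.2)])) PySem.Dict.empty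

-- the 'for d in range(ROW_Y_THRESHOLD + 1): … break' loop of B, as recursion over the range list;
-- Python's falsy None/[] from buckets.get both become the empty list via getD [] (same truthiness)
def pfrFindTop (buckets : PySem.Dict Int (List (Int × String))) (l_top : Int) : List Int → Option Int
  | [] => none
  | d :: ds =>
    let lo := (buckets.get? (l_top - d)).getD []
    let hi := if d ≠ 0 then (buckets.get? (l_top + d)).getD [] else []
    let bt : Option Int := if !lo.isEmpty then some (l_top - d) else none
    let bt : Option Int :=
      if !hi.isEmpty && (bt.isNone || decide ((hi.headD (0, "")).1 < (lo.headD (0, "")).1))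
      then some (l_top + d) else bt
    match bt with
    | some t => some t
    | none => pfrFindTop buckets l_top ds

-- outer loop body of B ('buckets[chosen_top].pop(0)' = split the bucket, re-insert the tail)
def pfrStepB (st : List (String × String) × PySem.Dict Int (List (Int × String)))
    (l : Int × String) : List (String × String) × PySem.Dict Int (List (Int × String)) :=
  match pfrFindTop st.2 l.1 (PySem.List.pyRange 0 (ROW_Y_THRESHOLD + 1) 1) with
  | none => (st.1 ++ [(l.2, "")], st.2)
  | some t =>
    match st.2.get? t with
    | some (q :: rest) => (st.1 ++ [(l.2, q.2)], st.2.insert t rest)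
    | _ => (st.1 ++ [(l.2, "")], st.2)   -- unreachable: pfrFindTop only returns tops with a nonempty bucket

def pair_form_rows_alt (left_lines : List (Int × String)) (right_lines : List (Int × String)) : List (String × String) :=
  (left_lines.foldl pfrStepB (([] : List (String × String)), pfrBuckets right_lines)).1

-- ===== PRECONDITION & SPEC =====
def Spec_pair_form_rows (left_lines : List (Int × String)) (right_lines : List (Int × String)) (out : List (String × String)) : Prop := out = pair_form_rows_alt left_lines right_lines
instance (left_lines : List (Int × String)) (right_lines : List (Int × String)) (out : List (String × String)) : Decidable (Spec_pair_form_rows left_lines right_lines out) := by unfold Spec_pair_form_rows; infer_instance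

-- ===== CLAIM (what is proved, stated in full; the proofs are below) =====
def Claim_equal_pair_form_rows : Prop := ∀ (left_lines : List (Int × String)) (right_lines : List (Int × String)), Dom_pair_form_rows left_lines right_lines → Spec_pair_form_rows left_lines right_lines (pair_form_rows left_lines right_lines)

-- ===== LEMMAS AND PROOFS =====

-- abbreviation for the projection a bucket stores: (index, text)
def pfrPi (p : Int × (Int × String)) : Int × String := (p.1, p.2.2)

-- the right rows still available at top t, as full (index, (top, text)) triples
def pfrAvail (used : PySem.Set Int) (rights : List (Int × String)) (t : Int) :
    List (Int × (Int × String)) :=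
  (PySem.List.enumerate rights 0).filter
    (fun p => p.2.1 == t && !(PySem.Set.contains used p.1))

-- coupling invariant between A's used-set and B's buckets
def pfrInv (used : PySem.Set Int) (rights : List (Int × String))
    (bk : PySem.Dict Int (List (Int × String))) : Prop :=
  ∀ t, bk.getD t [] = (pfrAvail used rights t).map pfrPi

-- rich version of A's inner fold, also carrying the chosen diff
def pfrSelStep (lt : Int) (used : PySem.Set Int)
    (acc : Option (Int × String × Int)) (p : Int × (Int × String)) :
    Option (Int × String × Int) :=
  if PySem.Set.contains used p.1 then acc
  else
    let diff := |lt - p.2.1|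
    let ok : Bool := decide (diff ≤ ROW_Y_THRESHOLD) &&
      (match acc with | none => true | some q => decide (diff < q.2.2))
    if ok then some (p.1, p.2.2, diff) else acc

def pfrProj : Option (Int × String × Int) → Option (Int × String) × Option Int
  | none => (none, none)
  | some q => (some (q.1, q.2.1), some q.2.2)

def pfrElig (lt : Int) (used : PySem.Set Int) (p : Int × (Int × String)) : Prop :=
  PySem.Set.contains used p.1 = false ∧ |lt - p.2.1| ≤ 10

def pfrLexMin (lt : Int) (used : PySem.Set Int) (xs : List (Int × (Int × String)))
    (p : Int × (Int × String)) : Prop :=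
  ∀ r ∈ xs, pfrElig lt used r →
    (|lt - p.2.1| < |lt - r.2.1| ∨ (|lt - p.2.1| = |lt - r.2.1| ∧ p.1 ≤ r.1))

theorem pfrSel_isSome (lt : Int) (used : PySem.Set Int)
    (xs : List (Int × (Int × String))) (q : Int × String × Int) :
    (xs.foldl (pfrSelStep lt used) (some q)).isSome := by
  induction xs generalizing q with
  | nil => rfl
  | cons p xs ih =>
    simp only [List.foldl_cons]
    have hex : ∃ q2, pfrSelStep lt used (some q) p = some q2 := by
      simp only [pfrSelStep]
      split_ifs <;> exact ⟨_, rfl⟩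
    obtain ⟨q2, hq2⟩ := hex
    rw [hq2]; exact ih q2

-- A's inner fold is the projection of the rich fold
theorem pfrProj_fold (lt : Int) (used : PySem.Set Int)
    (xs : List (Int × (Int × String))) (acc : Option (Int × String × Int)) :
    xs.foldl (pfrInnerStep lt used) (pfrProj acc) =
      pfrProj (xs.foldl (pfrSelStep lt used) acc) := by
  induction xs generalizing acc with
  | nil => rfl
  | cons p xs ih =>
    have hstep : pfrInnerStep lt used (pfrProj acc) p = pfrProj (pfrSelStep lt used acc p) := by
      cases acc <;> simp only [pfrInnerStep, pfrSelStep, pfrProj] <;> split_ifs <;> rfl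
    simp only [List.foldl_cons, hstep, ih]

theorem pfrSel_none_iff (lt : Int) (used : PySem.Set Int)
    (xs : List (Int × (Int × String))) :
    xs.foldl (pfrSelStep lt used) none = none ↔ ∀ p ∈ xs, ¬ pfrElig lt used p := by
  induction xs with
  | nil => simp
  | cons p xs ih =>
    simp only [List.foldl_cons]
    by_cases hc : PySem.Set.contains used p.1 = true
    · have hstep : pfrSelStep lt used none p = none := by
        simp only [pfrSelStep]; rw [if_pos hc]
      rw [hstep, ih]
      constructor
      · intro h r hr
        rcases List.mem_cons.mp hr with hr | hr
        · subst hr; intro he; rw [he.1] at hc; cases hc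
        · exact h r hr
      · intro h r hr; exact h r (List.mem_cons_of_mem _ hr)
    · have hcf : PySem.Set.contains used p.1 = false := by
        cases hcc : PySem.Set.contains used p.1
        · rfl
        · exact absurd hcc hc
      by_cases hd : |lt - p.2.1| ≤ 10
      · have hstep : pfrSelStep lt used none p = some (p.1, p.2.2, |lt - p.2.1|) := by
          simp only [pfrSelStep]
          rw [if_neg hc]
          have hok : (decide (|lt - p.2.1| ≤ ROW_Y_THRESHOLD) &&
              (match (none : Option (Int × String × Int)) with
               | none => true | some q => decide (|lt - p.2.1| < q.2.2))) = true := by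
            simp [ROW_Y_THRESHOLD, hd]
          rw [if_pos hok]
        rw [hstep]
        constructor
        · intro h
          have hs := pfrSel_isSome lt used xs (p.1, p.2.2, |lt - p.2.1|)
          rw [h] at hs; exact absurd hs (by simp)
        · intro h
          exact absurd ⟨hcf, hd⟩ (h p (List.mem_cons_self))
      · have hstep : pfrSelStep lt used none p = none := by
          simp only [pfrSelStep]
          rw [if_neg hc]
          have hok : (decide (|lt - p.2.1| ≤ ROW_Y_THRESHOLD) &&
              (match (none : Option (Int × String × Int)) with
               | none => true | some q => decide (|lt - p.2.1| < q.2.2))) = false := by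
            simp [ROW_Y_THRESHOLD, hd]
          rw [if_neg (by simp [hok])]
        rw [hstep, ih]
        constructor
        · intro h r hr
          rcases List.mem_cons.mp hr with hr | hr
          · subst hr; intro he; exact hd he.2
          · exact h r hr
        · intro h r hr; exact h r (List.mem_cons_of_mem _ hr)

theorem pfrSel_spec (lt : Int) (used : PySem.Set Int)
    (xs : List (Int × (Int × String)))
    (hpw : xs.Pairwise (fun p q => p.1 < q.1)) (q : Int × String × Int)
    (hq : xs.foldl (pfrSelStep lt used) none = some q) :
    ∃ p ∈ xs, pfrElig lt used p ∧ q = (p.1, p.2.2, |lt - p.2.1|) ∧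
      pfrLexMin lt used xs p := by
  induction xs using List.reverseRecOn generalizing q with
  | nil => simp at hq
  | append_singleton ys p0 ih =>
    rw [List.foldl_append, List.foldl_cons, List.foldl_nil] at hq
    rw [List.pairwise_append] at hpw
    obtain ⟨hpy, _, hlt⟩ := hpw
    have hlt0 : ∀ r ∈ ys, r.1 < p0.1 := fun r hr => hlt r hr p0 (List.mem_singleton_self _)
    cases hy : ys.foldl (pfrSelStep lt used) none with
    | none =>
      rw [hy] at hq
      have hall := (pfrSel_none_iff lt used ys).1 hy
      by_cases hc : PySem.Set.contains used p0.1 = true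
      · rw [pfrSelStep, if_pos hc] at hq; cases hq
      · have hcf : PySem.Set.contains used p0.1 = false := by
          cases hcc : PySem.Set.contains used p0.1
          · rfl
          · exact absurd hcc hc
        by_cases hd : |lt - p0.2.1| ≤ 10
        · rw [pfrSelStep, if_neg hc] at hq
          rw [if_pos (by simp [ROW_Y_THRESHOLD, hd])] at hq
          refine ⟨p0, by simp, ⟨hcf, hd⟩, Option.some_inj.mp hq.symm, ?_⟩
          intro r hr he
          rcases List.mem_append.mp hr with hr | hr
          · exact absurd he (hall r hr)
          · rw [List.mem_singleton.mp hr]; right; exact ⟨rfl, le_refl _⟩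
        · rw [pfrSelStep, if_neg hc] at hq
          rw [if_neg (by simp [ROW_Y_THRESHOLD, hd])] at hq
          cases hq
    | some q0 =>
      rw [hy] at hq
      obtain ⟨pm, hpm, hem, hq0, hmin⟩ := ih hpy q0 hy
      by_cases hc : PySem.Set.contains used p0.1 = true
      · rw [pfrSelStep, if_pos hc] at hq
        refine ⟨pm, List.mem_append_left _ hpm, hem,
          by rw [← Option.some_inj.mp hq]; exact hq0, ?_⟩
        intro r hr he
        rcases List.mem_append.mp hr with hr | hr
        · exact hmin r hr he
        · rw [List.mem_singleton.mp hr] at he; rw [he.1] at hc; cases hc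
      · by_cases hok : |lt - p0.2.1| ≤ 10 ∧ |lt - p0.2.1| < q0.2.2
        · rw [pfrSelStep, if_neg hc] at hq
          rw [if_pos (by simp [ROW_Y_THRESHOLD, hok.1, hok.2])] at hq
          have hcf : PySem.Set.contains used p0.1 = false := by
            cases hcc : PySem.Set.contains used p0.1
            · rfl
            · exact absurd hcc hc
          refine ⟨p0, List.mem_append_right _ (List.mem_singleton_self _), ⟨hcf, hok.1⟩,
            Option.some_inj.mp hq.symm, ?_⟩
          intro r hr he
          rcases List.mem_append.mp hr with hr | hr
          · left
            have hd0 : |lt - p0.2.1| < |lt - pm.2.1| := by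
              have h2 := hok.2; rw [hq0] at h2; simpa using h2
            rcases hmin r hr he with h | h
            · omega
            · omega
          · rw [List.mem_singleton.mp hr]; right; exact ⟨rfl, le_refl _⟩
        · rw [pfrSelStep, if_neg hc] at hq
          have hokf : (decide (|lt - p0.2.1| ≤ ROW_Y_THRESHOLD) &&
              (match (some q0 : Option (Int × String × Int)) with
               | none => true | some q => decide (|lt - p0.2.1| < q.2.2))) = false := by
            rcases Decidable.not_and_iff_not_or_not.mp hok with h | h <;>
              simp [ROW_Y_THRESHOLD, h]
          rw [if_neg (by simp [hokf])] at hq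
          refine ⟨pm, List.mem_append_left _ hpm, hem,
            by rw [← Option.some_inj.mp hq]; exact hq0, ?_⟩
          intro r hr he
          rcases List.mem_append.mp hr with hr | hr
          · exact hmin r hr he
          · rw [List.mem_singleton.mp hr]
            rcases Decidable.not_and_iff_not_or_not.mp hok with h | h
            · rw [List.mem_singleton.mp hr] at he; exact absurd he.2 h
            · rw [hq0] at h
              simp only [not_lt] at h
              have hd1 : |lt - pm.2.1| ≤ |lt - p0.2.1| := by simpa using h
              rcases lt_or_eq_of_le hd1 with h2 | h2
              · left; exact h2
              · right; exact ⟨h2, le_of_lt (hlt0 pm hpm)⟩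

theorem pfrLexMin_unique (lt : Int) (used : PySem.Set Int)
    (xs : List (Int × (Int × String)))
    (hpw : xs.Pairwise (fun p q => p.1 < q.1))
    (p q : Int × (Int × String)) (hp : p ∈ xs) (hq : q ∈ xs)
    (hep : pfrElig lt used p) (heq : pfrElig lt used q)
    (hmp : pfrLexMin lt used xs p) (hmq : pfrLexMin lt used xs q) : p = q := by
  have h1 := hmp q hq heq
  have h2 := hmq p hp hep
  have hfst : p.1 = q.1 := by omega
  have hnd : (xs.map (·.1)).Nodup := by
    have hm := (List.pairwise_map (f := fun p : Int × (Int × String) => p.1)).mpr hpw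
    exact hm.imp ne_of_lt
  exact List.inj_on_of_nodup_map hnd hp hq hfst

theorem pfrSel_eq_some (lt : Int) (used : PySem.Set Int)
    (xs : List (Int × (Int × String)))
    (hpw : xs.Pairwise (fun p q => p.1 < q.1))
    (p : Int × (Int × String)) (hp : p ∈ xs) (hep : pfrElig lt used p)
    (hmp : pfrLexMin lt used xs p) :
    xs.foldl (pfrSelStep lt used) none = some (p.1, p.2.2, |lt - p.2.1|) := by
  cases h : xs.foldl (pfrSelStep lt used) none with
  | none => exact absurd hep ((pfrSel_none_iff lt used xs).1 h p hp)
  | some q =>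
    obtain ⟨p2, hp2, hep2, hq2, hmp2⟩ := pfrSel_spec lt used xs hpw q h
    rw [pfrLexMin_unique lt used xs hpw p2 p hp2 hp hep2 hep hmp2 hmp] at hq2
    rw [hq2]

-- availability lists are sorted by original index and characterised by membership
theorem pfrAvail_pairwise (used : PySem.Set Int) (rights : List (Int × String)) (t : Int) :
    (pfrAvail used rights t).Pairwise (fun p q => p.1 < q.1) :=
  (PySem.List.pairwise_lt_enumerate rights 0).filter _

theorem pfrMem_avail (used : PySem.Set Int) (rights : List (Int × String)) (t : Int)
    (p : Int × (Int × String)) :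
    p ∈ pfrAvail used rights t ↔
      p ∈ PySem.List.enumerate rights 0 ∧ p.2.1 = t ∧
        PySem.Set.contains used p.1 = false := by
  simp [pfrAvail, List.mem_filter]

theorem pfrEnum_inj (rights : List (Int × String)) (p q : Int × (Int × String))
    (hp : p ∈ PySem.List.enumerate rights 0) (hq : q ∈ PySem.List.enumerate rights 0)
    (h : p.1 = q.1) : p = q := by
  have hnd : ((PySem.List.enumerate rights 0).map (·.1)).Nodup := by
    have hm := (List.pairwise_map (f := fun p : Int × (Int × String) => p.1)).mpr
      (PySem.List.pairwise_lt_enumerate rights 0)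
    exact hm.imp ne_of_lt
  exact List.inj_on_of_nodup_map hnd hp hq h

-- the initial buckets satisfy the invariant
theorem pfrBuckets_build (l : List (Int × (Int × String)))
    (d : PySem.Dict Int (List (Int × String))) (t : Int) :
    (l.foldl (fun d p => d.modify p.2.1 [] (fun b => b ++ [(p.1, p.2.2)])) d).getD t [] =
      d.getD t [] ++ ((l.filter (fun p => p.2.1 == t)).map pfrPi) := by
  induction l generalizing d with
  | nil => simp
  | cons p l ih =>
    simp only [List.foldl_cons, List.filter_cons]
    rw [ih, PySem.Dict.getD_modify]
    by_cases h : p.2.1 = t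
    · simp [h, pfrPi]
    · simp [h, Ne.symm h]

theorem pfrInv_init (rights : List (Int × String)) :
    pfrInv PySem.Set.empty rights (pfrBuckets rights) := by
  intro t
  unfold pfrBuckets
  rw [pfrBuckets_build]
  simp [pfrAvail, PySem.Set.empty]

-- what a bucket-truthiness probe of B means for the chosen distance
def pfrChosen (bk : PySem.Dict Int (List (Int × String))) (lt d t : Int) : Prop :=
  let lo := (bk.get? (lt - d)).getD []
  let hi := if d ≠ 0 then (bk.get? (lt + d)).getD [] else []
  (hi ≠ [] ∧ (lo = [] ∨ (hi.headD (0, "")).1 < (lo.headD (0, "")).1) ∧ t = lt + d) ∨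
  (lo ≠ [] ∧ (hi = [] ∨ (lo.headD (0, "")).1 ≤ (hi.headD (0, "")).1) ∧ t = lt - d)

theorem pfrFindTop_cons (bk : PySem.Dict Int (List (Int × String))) (lt d : Int)
    (ds : List Int) :
    pfrFindTop bk lt (d :: ds) =
      if (if d ≠ 0 then (bk.get? (lt + d)).getD [] else []) ≠ [] ∧
          ((bk.get? (lt - d)).getD [] = [] ∨
           (((if d ≠ 0 then (bk.get? (lt + d)).getD [] else []).headD (0, "")).1 <
            (((bk.get? (lt - d)).getD []).headD (0, "")).1))
      then some (lt + d)
      else if (bk.get? (lt - d)).getD [] ≠ [] then some (lt - d)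
      else pfrFindTop bk lt ds := by
  cases hlo : (bk.get? (lt - d)).getD [] with
  | nil =>
    cases hhi : (if d ≠ 0 then (bk.get? (lt + d)).getD [] else []) with
    | nil => simp [pfrFindTop, hlo, hhi]
    | cons b hi2 => simp [pfrFindTop, hlo, hhi]
  | cons a lo2 =>
    cases hhi : (if d ≠ 0 then (bk.get? (lt + d)).getD [] else []) with
    | nil => simp [pfrFindTop, hlo, hhi]
    | cons b hi2 =>
      by_cases hcmp : b.1 < a.1
      · simp [pfrFindTop, hlo, hhi, hcmp]
      · simp [pfrFindTop, hlo, hhi, hcmp]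

theorem pfrFindTop_spec (bk : PySem.Dict Int (List (Int × String))) (lt : Int) :
    ∀ (n : Nat) (a : Int), a + n = 11 →
      ((pfrFindTop bk lt (PySem.List.pyRange a 11 1) = none →
        ∀ d, a ≤ d → d < 11 →
          (bk.get? (lt - d)).getD [] = [] ∧ (bk.get? (lt + d)).getD [] = []) ∧
      (∀ t, pfrFindTop bk lt (PySem.List.pyRange a 11 1) = some t →
        ∃ d, a ≤ d ∧ d < 11 ∧
          (∀ d', a ≤ d' → d' < d →
            (bk.get? (lt - d')).getD [] = [] ∧ (bk.get? (lt + d')).getD [] = []) ∧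
          pfrChosen bk lt d t)) := by
  intro n
  induction n with
  | zero =>
    intro a ha
    have h11 : a = 11 := by omega
    subst h11
    rw [PySem.List.pyRange_one_eq_nil (le_refl 11)]
    constructor
    · intro _ d h1 h2; omega
    · intro t ht; simp [pfrFindTop] at ht
  | succ n ih =>
    intro a ha
    have ha11 : a < 11 := by omega
    rw [PySem.List.pyRange_one_cons ha11, pfrFindTop_cons]
    have hIH := ih (a + 1) (by omega)
    by_cases h1 : (if a ≠ 0 then (bk.get? (lt + a)).getD [] else []) ≠ [] ∧
        ((bk.get? (lt - a)).getD [] = [] ∨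
         (((if a ≠ 0 then (bk.get? (lt + a)).getD [] else []).headD (0, "")).1 <
          (((bk.get? (lt - a)).getD []).headD (0, "")).1))
    · rw [if_pos h1]
      constructor
      · intro h; cases h
      · intro t ht
        refine ⟨a, le_refl a, ha11, fun d' h1' h2' => absurd h1' (by omega), ?_⟩
        unfold pfrChosen
        exact Or.inl ⟨h1.1, h1.2, (Option.some_inj.mp ht).symm⟩
    · rw [if_neg h1]
      by_cases h2 : (bk.get? (lt - a)).getD [] ≠ []
      · rw [if_pos h2]
        have hle : (if a ≠ 0 then (bk.get? (lt + a)).getD [] else []) = [] ∨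
            (((bk.get? (lt - a)).getD []).headD (0, "")).1 ≤
             ((if a ≠ 0 then (bk.get? (lt + a)).getD [] else []).headD (0, "")).1 := by
          by_cases hh : (if a ≠ 0 then (bk.get? (lt + a)).getD [] else []) = []
          · exact Or.inl hh
          · right
            have hnot : ¬ ((bk.get? (lt - a)).getD [] = [] ∨
                (((if a ≠ 0 then (bk.get? (lt + a)).getD [] else []).headD (0, "")).1 <
                 (((bk.get? (lt - a)).getD []).headD (0, "")).1)) := fun hc => h1 ⟨hh, hc⟩
            exact not_lt.mp (fun hlt => hnot (Or.inr hlt))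
        constructor
        · intro h; cases h
        · intro t ht
          refine ⟨a, le_refl a, ha11, fun d' h1' h2' => absurd h1' (by omega), ?_⟩
          unfold pfrChosen
          exact Or.inr ⟨h2, hle, (Option.some_inj.mp ht).symm⟩
      · rw [if_neg h2]
        simp only [not_not] at h2
        have hhi : (if a ≠ 0 then (bk.get? (lt + a)).getD [] else []) = [] := by
          by_contra hh
          exact h1 ⟨hh, Or.inl h2⟩
        have hpa : (bk.get? (lt + a)).getD [] = [] := by
          by_cases h0 : a = 0
          · subst h0
            have : lt + 0 = lt - 0 := by ring
            rw [this]; exact h2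
          · rw [if_pos h0] at hhi; exact hhi
        constructor
        · intro h d hd1 hd2
          rcases eq_or_lt_of_le hd1 with hd | hd
          · subst hd; exact ⟨h2, hpa⟩
          · exact hIH.1 h d (by omega) hd2
        · intro t ht
          obtain ⟨d, hd1, hd2, hmin, hch⟩ := hIH.2 t ht
          refine ⟨d, by omega, hd2, ?_, hch⟩
          intro d' h1' h2'
          rcases eq_or_lt_of_le h1' with hd' | hd'
          · subst hd'; exact ⟨h2, hpa⟩
          · exact hmin d' (by omega) h2'

theorem pfrContains_add (s : PySem.Set Int) (x y : Int) :
    PySem.Set.contains (PySem.Set.add s x) y = (PySem.Set.contains s y || y == x) := by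
  rw [Bool.eq_iff_iff]
  simp [PySem.Set.mem_add]

theorem pfrGet?_of_ne_nil {α : Type} (o : Option (List α)) (h : o.getD [] ≠ []) :
    o = some (o.getD []) := by
  cases o
  · simp at h
  · rfl

theorem pfrHead_min (used : PySem.Set Int) (rights : List (Int × String)) (t : Int)
    (h : Int × (Int × String)) (tail : List (Int × (Int × String)))
    (hA : pfrAvail used rights t = h :: tail)
    (r : Int × (Int × String)) (hr : r ∈ pfrAvail used rights t) : h.1 ≤ r.1 := by
  have hpw := pfrAvail_pairwise used rights t
  rw [hA] at hpw hr
  rcases List.mem_cons.mp hr with hr | hr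
  · rw [hr]
  · exact le_of_lt ((List.pairwise_cons.mp hpw).1 r hr)

theorem pfrAvail_add (used : PySem.Set Int) (rights : List (Int × String))
    (h0 : Int × (Int × String)) (t2 : Int) :
    pfrAvail (PySem.Set.add used h0.1) rights t2 =
      (pfrAvail used rights t2).filter (fun p => !(p.1 == h0.1)) := by
  unfold pfrAvail
  rw [List.filter_filter]
  apply List.filter_congr
  intro p _
  simp only [pfrContains_add, Bool.not_or]
  cases hb1 : (p.2.1 == t2) <;> cases hb2 : PySem.Set.contains used p.1 <;>
    cases hb3 : (p.1 == h0.1) <;> rfl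

-- shared tail of the some-branch: once B's chosen bucket head h is known to be
-- A's lexicographic minimum, both steps append the same pair and the invariant survives
theorem pfrStep_core (rights : List (Int × String)) (lt : Int) (ltext : String)
    (used : PySem.Set Int) (bk : PySem.Dict Int (List (Int × String)))
    (hInv : pfrInv used rights bk)
    (hbk : ∀ t, (bk.get? t).getD [] = (pfrAvail used rights t).map pfrPi)
    (pairs : List (String × String)) (t : Int)
    (hft : pfrFindTop bk lt (PySem.List.pyRange 0 11 1) = some t)
    (h : Int × (Int × String)) (tail : List (Int × (Int × String)))
    (hA : pfrAvail used rights t = h :: tail)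
    (hel : pfrElig lt used h)
    (hlex : pfrLexMin lt used (PySem.List.enumerate rights 0) h) :
    ∃ x used2 bk2,
      pfrStepA rights (pairs, used) (lt, ltext) = (pairs ++ [x], used2) ∧
      pfrStepB (pairs, bk) (lt, ltext) = (pairs ++ [x], bk2) ∧
      pfrInv used2 rights bk2 := by
  have h11 : (ROW_Y_THRESHOLD + 1 : Int) = 11 := by norm_num [ROW_Y_THRESHOLD]
  have hpwE := PySem.List.pairwise_lt_enumerate rights 0
  have hmemE : h ∈ PySem.List.enumerate rights 0 := by
    have hm : h ∈ pfrAvail used rights t := by rw [hA]; exact List.mem_cons_self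
    exact ((pfrMem_avail used rights t h).1 hm).1
  have htoph : h.2.1 = t := by
    have hm : h ∈ pfrAvail used rights t := by rw [hA]; exact List.mem_cons_self
    exact ((pfrMem_avail used rights t h).1 hm).2.1
  have hsel := pfrSel_eq_some lt used _ hpwE h hmemE hel hlex
  have hgg : (bk.get? t).getD [] = pfrPi h :: (tail.map pfrPi) := by
    rw [hbk, hA]; rfl
  have hsome : bk.get? t = some (pfrPi h :: (tail.map pfrPi)) := by
    have hne : (bk.get? t).getD [] ≠ [] := by rw [hgg]; simp
    rw [pfrGet?_of_ne_nil _ hne, hgg]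
  refine ⟨(ltext, h.2.2), PySem.Set.add used h.1, bk.insert t (tail.map pfrPi), ?_, ?_, ?_⟩
  · simp only [pfrStepA]
    rw [show ((none, none) : Option (Int × String) × Option Int) =
        pfrProj none from rfl, pfrProj_fold, hsel]
    rfl
  · simp only [pfrStepB]
    rw [h11, hft]
    simp only [hsome]
    rfl
  · intro t2
    rw [PySem.Dict.getD_insert]
    by_cases ht2 : t2 = t
    · rw [if_pos ht2, ht2, pfrAvail_add, hA]
      have hpw := pfrAvail_pairwise used rights t
      rw [hA] at hpw
      rw [List.filter_cons_of_neg (by simp)]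
      rw [List.filter_eq_self.2 (fun r hr => by
        have hlt := (List.pairwise_cons.mp hpw).1 r hr
        simp only [Bool.not_eq_eq_eq_not, Bool.not_true, beq_eq_false_iff_ne, ne_eq]
        omega)]
    · rw [if_neg ht2, pfrAvail_add]
      rw [List.filter_eq_self.2 (fun r hr => by
        have hrm := (pfrMem_avail used rights t2 r).1 hr
        have hne : r.1 ≠ h.1 := by
          intro he
          have := pfrEnum_inj rights r h hrm.1 hmemE he
          rw [this] at hrm
          exact ht2 (hrm.2.1 ▸ htoph ▸ rfl)
        simp only [Bool.not_eq_eq_eq_not, Bool.not_true, beq_eq_false_iff_ne, ne_eq]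
        exact hne)]
      exact hInv t2

-- one left row: both step functions append the same pair and preserve the invariant
theorem pfrStep_equiv (rights : List (Int × String)) (lt : Int) (ltext : String)
    (used : PySem.Set Int) (bk : PySem.Dict Int (List (Int × String)))
    (hInv : pfrInv used rights bk) (pairs : List (String × String)) :
    ∃ x used' bk',
      pfrStepA rights (pairs, used) (lt, ltext) = (pairs ++ [x], used') ∧
      pfrStepB (pairs, bk) (lt, ltext) = (pairs ++ [x], bk') ∧
      pfrInv used' rights bk' := by
  have h11 : (ROW_Y_THRESHOLD + 1 : Int) = 11 := by norm_num [ROW_Y_THRESHOLD]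
  have hpwE := PySem.List.pairwise_lt_enumerate rights 0
  have hbk : ∀ t, (bk.get? t).getD [] = (pfrAvail used rights t).map pfrPi := by
    intro t; rw [← PySem.Dict.getD_eq_get?_getD]; exact hInv t
  have hFT := pfrFindTop_spec bk lt 11 0 (by norm_num)
  have hstepA : pfrStepA rights (pairs, used) (lt, ltext) =
      (match (pfrProj ((PySem.List.enumerate rights 0).foldl (pfrSelStep lt used) none)).1 with
       | some q => (pairs ++ [(ltext, q.2)], PySem.Set.add used q.1)
       | none => (pairs ++ [(ltext, "")], used)) := by
    simp only [pfrStepA]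
    rw [show ((none, none) : Option (Int × String) × Option Int) =
        pfrProj none from rfl, pfrProj_fold]
  cases hft : pfrFindTop bk lt (PySem.List.pyRange 0 11 1) with
  | none =>
    have hempty := hFT.1 hft
    have hnone : (PySem.List.enumerate rights 0).foldl (pfrSelStep lt used) none = none := by
      refine (pfrSel_none_iff lt used _).2 (fun p hp he => ?_)
      have hpa : p ∈ pfrAvail used rights p.2.1 :=
        (pfrMem_avail used rights p.2.1 p).2 ⟨hp, rfl, he.1⟩
      have hd10 : |lt - p.2.1| ≤ 10 := he.2
      have hd0 : (0 : Int) ≤ |lt - p.2.1| := abs_nonneg _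
      have hem := hempty |lt - p.2.1| hd0 (by omega)
      rcases abs_cases (lt - p.2.1) with ⟨h1, _⟩ | ⟨h1, _⟩
      · have htop : p.2.1 = lt - |lt - p.2.1| := by omega
        have hmm : pfrPi p ∈ (pfrAvail used rights p.2.1).map pfrPi :=
          List.mem_map_of_mem hpa
        rw [← hbk] at hmm
        rw [htop, hem.1] at hmm
        simp at hmm
      · have htop : p.2.1 = lt + |lt - p.2.1| := by omega
        have hmm : pfrPi p ∈ (pfrAvail used rights p.2.1).map pfrPi :=
          List.mem_map_of_mem hpa
        rw [← hbk] at hmm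
        rw [htop, hem.2] at hmm
        simp at hmm
    refine ⟨(ltext, ""), used, bk, ?_, ?_, hInv⟩
    · rw [hstepA, hnone]; rfl
    · simp only [pfrStepB]
      rw [h11, hft]
  | some t =>
    obtain ⟨d, hd0, hd11, hmin, hch⟩ := hFT.2 t hft
    -- no eligible row is strictly nearer than d
    have hfar : ∀ r ∈ PySem.List.enumerate rights 0, pfrElig lt used r → d ≤ |lt - r.2.1| := by
      intro r hr her
      by_contra hcon
      have hcon2 := lt_of_not_ge hcon
      have hra : r ∈ pfrAvail used rights r.2.1 :=
        (pfrMem_avail used rights r.2.1 r).2 ⟨hr, rfl, her.1⟩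
      have hmm : pfrPi r ∈ (pfrAvail used rights r.2.1).map pfrPi := List.mem_map_of_mem hra
      rw [← hbk] at hmm
      have hem := hmin |lt - r.2.1| (abs_nonneg _) hcon2
      rcases abs_cases (lt - r.2.1) with ⟨h1, _⟩ | ⟨h1, _⟩
      · have htop : r.2.1 = lt - |lt - r.2.1| := by omega
        rw [htop, hem.1] at hmm; simp at hmm
      · have htop : r.2.1 = lt + |lt - r.2.1| := by omega
        rw [htop, hem.2] at hmm; simp at hmm
    simp only [pfrChosen] at hch
    rcases hch with ⟨hhi, hcmp, ht⟩ | ⟨hlo, hcmp, ht⟩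
    · -- chosen from the upper bucket: t = lt + d
      have h0 : d ≠ 0 := by intro h0; rw [h0] at hhi; simp at hhi
      rw [if_pos h0] at hhi hcmp
      have hbt : (bk.get? t).getD [] ≠ [] := by rw [ht]; exact hhi
      have hAne : pfrAvail used rights t ≠ [] := by
        intro hnil
        rw [hbk, hnil] at hbt; simp at hbt
      cases hAcase : pfrAvail used rights t with
      | nil => exact absurd hAcase hAne
      | cons h tail =>
        have hm : h ∈ pfrAvail used rights t := by
          rw [hAcase]; exact List.mem_cons_self
        obtain ⟨hmemE, htoph, hcf⟩ := (pfrMem_avail used rights t h).1 hm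
        have dh : |lt - h.2.1| = d := by
          rw [htoph, ht]
          have he2 : lt - (lt + d) = -d := by ring
          rw [he2, abs_neg]; exact abs_of_nonneg hd0
        have hel : pfrElig lt used h := ⟨hcf, by rw [dh]; omega⟩
        have hlex : pfrLexMin lt used (PySem.List.enumerate rights 0) h := by
          intro r hr her
          have hge := hfar r hr her
          rcases lt_or_eq_of_le hge with hltd | heqd
          · left; rw [dh]; exact hltd
          · right
            refine ⟨by rw [dh, heqd], ?_⟩
            rcases abs_cases (lt - r.2.1) with ⟨h1, _⟩ | ⟨h1, _⟩
            · -- r sits in the lower bucket: the hi-head < lo-head comparison decides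
              have htr : r.2.1 = lt - d := by omega
              have hrA : r ∈ pfrAvail used rights (lt - d) :=
                (pfrMem_avail used rights (lt - d) r).2 ⟨hr, htr, her.1⟩
              have hlon : (bk.get? (lt - d)).getD [] ≠ [] := by
                rw [hbk]
                intro hnil
                have hmm := List.mem_map_of_mem (f := pfrPi) hrA
                rw [hnil] at hmm; simp at hmm
              rcases hcmp with hc | hc
              · exact absurd hc hlon
              · cases hA2 : pfrAvail used rights (lt - d) with
                | nil => rw [hA2] at hrA; simp at hrA
                | cons h2 tail2 =>
                  have hh2 : h2.1 ≤ r.1 :=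
                    pfrHead_min used rights (lt - d) h2 tail2 hA2 r hrA
                  have hlohead : (((bk.get? (lt - d)).getD []).headD (0, "")).1 = h2.1 := by
                    rw [hbk, hA2]; rfl
                  have hhihead : (((bk.get? (lt + d)).getD []).headD (0, "")).1 = h.1 := by
                    rw [← ht, hbk, hAcase]; rfl
                  rw [hhihead, hlohead] at hc
                  omega
            · have htr : r.2.1 = t := by rw [ht]; omega
              have hrA : r ∈ pfrAvail used rights t :=
                (pfrMem_avail used rights t r).2 ⟨hr, htr, her.1⟩
              exact pfrHead_min used rights t h tail hAcase r hrA
        exact pfrStep_core rights lt ltext used bk hInv hbk pairs t hft h tail hAcase hel hlex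
    · -- chosen from the lower bucket: t = lt - d
      have hbt : (bk.get? t).getD [] ≠ [] := by rw [ht]; exact hlo
      have hAne : pfrAvail used rights t ≠ [] := by
        intro hnil
        rw [hbk, hnil] at hbt; simp at hbt
      cases hAcase : pfrAvail used rights t with
      | nil => exact absurd hAcase hAne
      | cons h tail =>
        have hm : h ∈ pfrAvail used rights t := by
          rw [hAcase]; exact List.mem_cons_self
        obtain ⟨hmemE, htoph, hcf⟩ := (pfrMem_avail used rights t h).1 hm
        have dh : |lt - h.2.1| = d := by
          rw [htoph, ht]
          have he2 : lt - (lt - d) = d := by ring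
          rw [he2]; exact abs_of_nonneg hd0
        have hel : pfrElig lt used h := ⟨hcf, by rw [dh]; omega⟩
        have hlex : pfrLexMin lt used (PySem.List.enumerate rights 0) h := by
          intro r hr her
          have hge := hfar r hr her
          rcases lt_or_eq_of_le hge with hltd | heqd
          · left; rw [dh]; exact hltd
          · right
            refine ⟨by rw [dh, heqd], ?_⟩
            rcases abs_cases (lt - r.2.1) with ⟨h1, _⟩ | ⟨h1, _⟩
            · have htr : r.2.1 = t := by rw [ht]; omega
              have hrA : r ∈ pfrAvail used rights t :=
                (pfrMem_avail used rights t r).2 ⟨hr, htr, her.1⟩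
              exact pfrHead_min used rights t h tail hAcase r hrA
            · by_cases h0 : d = 0
              · have htr : r.2.1 = t := by rw [ht]; omega
                have hrA : r ∈ pfrAvail used rights t :=
                  (pfrMem_avail used rights t r).2 ⟨hr, htr, her.1⟩
                exact pfrHead_min used rights t h tail hAcase r hrA
              · -- r sits in the upper bucket: the lo-head ≤ hi-head comparison decides
                have htr : r.2.1 = lt + d := by omega
                have hrA : r ∈ pfrAvail used rights (lt + d) :=
                  (pfrMem_avail used rights (lt + d) r).2 ⟨hr, htr, her.1⟩
                have hhin : (bk.get? (lt + d)).getD [] ≠ [] := by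
                  rw [hbk]
                  intro hnil
                  have hmm := List.mem_map_of_mem (f := pfrPi) hrA
                  rw [hnil] at hmm; simp at hmm
                rw [if_pos h0] at hcmp
                rcases hcmp with hc | hc
                · exact absurd hc hhin
                · cases hA2 : pfrAvail used rights (lt + d) with
                  | nil => rw [hA2] at hrA; simp at hrA
                  | cons h2 tail2 =>
                    have hh2 : h2.1 ≤ r.1 :=
                      pfrHead_min used rights (lt + d) h2 tail2 hA2 r hrA
                    have hhihead : (((bk.get? (lt + d)).getD []).headD (0, "")).1 = h2.1 := by
                      rw [hbk, hA2]; rfl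
                    have hlohead : (((bk.get? (lt - d)).getD []).headD (0, "")).1 = h.1 := by
                      rw [← ht, hbk, hAcase]; rfl
                    rw [hhihead, hlohead] at hc
                    omega
        exact pfrStep_core rights lt ltext used bk hInv hbk pairs t hft h tail hAcase hel hlex

theorem pfrFold_equiv (rights : List (Int × String)) (lefts : List (Int × String)) :
    ∀ (pairs : List (String × String)) (used : PySem.Set Int)
      (bk : PySem.Dict Int (List (Int × String))), pfrInv used rights bk →
      (lefts.foldl (pfrStepA rights) (pairs, used)).1 =
        (lefts.foldl pfrStepB (pairs, bk)).1 := by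
  induction lefts with
  | nil => intro pairs used bk _; rfl
  | cons l ls ih =>
    intro pairs used bk hInv
    obtain ⟨x, used2, bk2, hA, hB, hInv2⟩ := pfrStep_equiv rights l.1 l.2 used bk hInv pairs
    simp only [List.foldl_cons]
    rw [show ((l.1, l.2) : Int × String) = l from rfl] at hA hB
    rw [hA, hB]
    exact ih (pairs ++ [x]) used2 bk2 hInv2

-- ===== VERDICT (by name: the statement is the Claim_ definition above) =====
theorem pair_form_rows_spec : Claim_equal_pair_form_rows := by
  intro left_lines right_lines _
  unfold Spec_pair_form_rows pair_form_rows pair_form_rows_alt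
  exact pfrFold_equiv right_lines left_lines [] PySem.Set.empty (pfrBuckets right_lines)
    (pfrInv_init right_lines)
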